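-- pv_equiv track=rewrite | github.com/Tianning9/Priority-Optimization-MAPP | code/planner.py | validate_paths
-- ===== SOURCE A (Python) =====
-- def validate_paths(paths):
--     # Gather for basic conflicts
--     vertices = set()
--     edges = set()
--
--     # Record each agent’s goal occupancy interval
--     goal_intervals = {}   # (x,y) -> earliest time occupied forever
--
--     # First pass: detect basic MAPF conflicts (vertex + edge swap)
--     for pid, path in paths.items():
--         # Record goal interval
--         gx, gy, gt = path[-1]
--         if (gx,gy) not in goal_intervals:
--             goal_intervals[(gx,gy)] = gt
--         else:
--             # take earliest arrival
--             goal_intervals[(gx,gy)] = min(goal_intervals[(gx,gy)], gt)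
--
--     # SECOND PASS: Detect GOAL OCCUPANCY COLLISIONS
--     for pid, path in paths.items():
--         for (x,y,t) in path:
--             for (gx,gy), Tg in goal_intervals.items():
--                 # If this (x,y,t) is a goal of another agent
--                 # and t >= Tg, that is a conflict
--                 if (x == gx and y == gy and t > Tg):
--                     # But allow if this is the same agent's own goal
--                     if not (path[-1][0] == gx and path[-1][1] == gy):
--                         return False
--
--     return True
-- ===== SOURCE B (Python) =====
-- def validate_paths(paths):
--     # Record each agent's goal occupancy interval: cell -> earliest arrival
--     goal_intervals = {}
--     for pid, path in paths.items():
--         gx, gy, gt = path[-1]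
--         cell = (gx, gy)
--         if cell in goal_intervals:
--             goal_intervals[cell] = min(goal_intervals[cell], gt)
--         else:
--             goal_intervals[cell] = gt
--
--     # Occupancy index: cell -> latest time it is occupied by an agent
--     # whose own goal is a different cell
--     occ = {}
--     for pid, path in paths.items():
--         ox, oy, _ = path[-1]
--         own = (ox, oy)
--         for (x, y, t) in path:
--             if (x, y) != own:
--                 c = (x, y)
--                 if c not in occ or occ[c] < t:
--                     occ[c] = t
--
--     # A goal cell visited after its earliest-arrival time by a foreign agent
--     # is a conflict
--     for cell, Tg in goal_intervals.items():
--         m = occ.get(cell)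
--         if m is not None and m > Tg:
--             return False
--     return True
-- ===== Notes on version B (the rewrite author's own statement) =====
-- stated objective: alternative
-- what changed: Replaces A's triple nested scan (every point of every path against every goal-interval entry) by building an occupancy index dict (cell -> latest time occupied by an agent whose own goal is elsewhere) and then checking each goal cell once against that index.
import Mathlib
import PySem

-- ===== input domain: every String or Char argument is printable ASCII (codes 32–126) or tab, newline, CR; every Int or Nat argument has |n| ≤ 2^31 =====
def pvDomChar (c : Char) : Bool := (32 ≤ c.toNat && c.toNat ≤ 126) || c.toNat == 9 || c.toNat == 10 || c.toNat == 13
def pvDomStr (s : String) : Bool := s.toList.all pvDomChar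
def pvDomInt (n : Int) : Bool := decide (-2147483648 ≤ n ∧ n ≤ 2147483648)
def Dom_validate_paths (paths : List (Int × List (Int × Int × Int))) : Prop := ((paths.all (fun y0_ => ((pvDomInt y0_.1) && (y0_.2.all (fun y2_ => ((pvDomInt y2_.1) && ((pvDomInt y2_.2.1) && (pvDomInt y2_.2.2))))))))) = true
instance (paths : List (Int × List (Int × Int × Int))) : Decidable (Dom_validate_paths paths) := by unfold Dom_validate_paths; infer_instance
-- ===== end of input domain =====

-- B replaces A's per-point scan over all goal intervals by a single occupancy index
-- (cell -> latest foreign-occupancy time) checked once per goal cell (alternative decomposition).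

-- ===== PORT A =====
-- first pass: goal_intervals[(gx,gy)] = earliest arrival; none = IndexError on path[-1]
def aGoal : List (Int × List (Int × Int × Int)) → PySem.Dict (Int × Int) Int →
    Option (PySem.Dict (Int × Int) Int)
  | [], gi => some gi
  | (_, path) :: rest, gi =>
    match PySem.List.pyGet? path (-1) with
    | none => none
    | some (gx, gy, gt) =>
      if gi.contains (gx, gy) = false then aGoal rest (gi.insert (gx, gy) gt)
      else aGoal rest (gi.insert (gx, gy) (min (gi.getD (gx, gy) 0) gt))

-- innermost loop: for (gx,gy),Tg in goal_intervals.items()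
def aScanGoals (gl : List ((Int × Int) × Int)) (x y t ox oy : Int) : Bool :=
  match gl with
  | [] => false
  | ((gx, gy), Tg) :: rest =>
    if x == gx && y == gy && decide (t > Tg) then
      if !(ox == gx && oy == gy) then true
      else aScanGoals rest x y t ox oy
    else aScanGoals rest x y t ox oy

-- middle loop: for (x,y,t) in path (true = conflict found, Python returns False)
def aScanPath (path : List (Int × Int × Int)) (gl : List ((Int × Int) × Int))
    (ox oy : Int) : Bool :=
  match path with
  | [] => false
  | (x, y, t) :: rest =>
    if aScanGoals gl x y t ox oy then true else aScanPath rest gl ox oy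

-- second pass; path[-1] is read once per path here, which is the same value Python's
-- path[-1][0]/path[-1][1] read (any empty path already raised in the first pass)
def aSecond : List (Int × List (Int × Int × Int)) → List ((Int × Int) × Int) → Option Bool
  | [], _ => some true
  | (_, path) :: rest, gl =>
    match PySem.List.pyGet? path (-1) with
    | none => none
    | some (ox, oy, _) =>
      if aScanPath path gl ox oy then some false else aSecond rest gl

def validate_paths (paths : List (Int × List (Int × Int × Int))) : Bool :=
  match aGoal (PySem.Dict.ofList paths).items PySem.Dict.empty with
  | none => true   -- unreachable under Pre_ (Python raises IndexError)
  | some gi =>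
    match aSecond (PySem.Dict.ofList paths).items gi.items with
    | none => true -- unreachable: first pass already succeeded
    | some b => b

-- ===== PORT B =====
-- first pass of Source B (same table, branch order as written in Source B)
def bGoal : List (Int × List (Int × Int × Int)) → PySem.Dict (Int × Int) Int →
    Option (PySem.Dict (Int × Int) Int)
  | [], gi => some gi
  | (_, path) :: rest, gi =>
    match PySem.List.pyGet? path (-1) with
    | none => none
    | some (gx, gy, gt) =>
      if gi.contains (gx, gy) then bGoal rest (gi.insert (gx, gy) (min (gi.getD (gx, gy) 0) gt))
      else bGoal rest (gi.insert (gx, gy) gt)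

-- inner loop over one path: record latest foreign occupancy per cell
def bOccPath (own : Int × Int) (path : List (Int × Int × Int))
    (occ : PySem.Dict (Int × Int) Int) : PySem.Dict (Int × Int) Int :=
  path.foldl (fun occ p =>
    if !((p.1, p.2.1) == own) then
      if occ.contains (p.1, p.2.1) = false || decide (occ.getD (p.1, p.2.1) 0 < p.2.2) then
        occ.insert (p.1, p.2.1) p.2.2
      else occ
    else occ) occ

-- occupancy-index pass of Source B
def bOcc : List (Int × List (Int × Int × Int)) → PySem.Dict (Int × Int) Int →
    Option (PySem.Dict (Int × Int) Int)
  | [], occ => some occ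
  | (_, path) :: rest, occ =>
    match PySem.List.pyGet? path (-1) with
    | none => none
    | some (ox, oy, _) => bOcc rest (bOccPath (ox, oy) path occ)

-- final pass: for cell, Tg in goal_intervals.items()
def bCheck (gl : List ((Int × Int) × Int)) (occ : PySem.Dict (Int × Int) Int) : Bool :=
  match gl with
  | [] => true
  | (cell, Tg) :: rest =>
    match occ.get? cell with
    | some m => if decide (m > Tg) then false else bCheck rest occ
    | none => bCheck rest occ

def validate_paths_alt (paths : List (Int × List (Int × Int × Int))) : Bool :=
  match bGoal (PySem.Dict.ofList paths).items PySem.Dict.empty with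
  | none => true   -- unreachable under Pre_ (Python raises IndexError)
  | some gi =>
    match bOcc (PySem.Dict.ofList paths).items PySem.Dict.empty with
    | none => true -- unreachable: first pass already succeeded
    | some occ => bCheck gi.items occ

-- ===== PRECONDITION & SPEC =====
-- Pre_ excludes exactly the inputs on which Python raises IndexError: some dict value
-- (after dict de-duplication of pids) is a zero-length path, whose path[-1] fails.
def Pre_validate_paths (paths : List (Int × List (Int × Int × Int))) : Prop :=
  ∀ p ∈ (PySem.Dict.ofList paths).items, p.2 ≠ []
instance (paths : List (Int × List (Int × Int × Int))) : Decidable (Pre_validate_paths paths) := by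
  unfold Pre_validate_paths; infer_instance

def pvWitness_validate_paths : (List (Int × List (Int × Int × Int))) :=
  [(0, [(0, 0, 0), (1, 0, 1)]), (1, [(1, 0, 0), (0, 0, 3)])]

def Spec_validate_paths (paths : List (Int × List (Int × Int × Int))) (out : Bool) : Prop := out = validate_paths_alt paths
instance (paths : List (Int × List (Int × Int × Int))) (out : Bool) : Decidable (Spec_validate_paths paths out) := by unfold Spec_validate_paths; infer_instance

-- ===== CLAIM (what is proved, stated in full; the proofs are below) =====
def Claim_equal_validate_paths : Prop := ∀ (paths : List (Int × List (Int × Int × Int))), Dom_validate_paths paths → Pre_validate_paths paths → Spec_validate_paths paths (validate_paths paths)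

-- ===== LEMMAS AND PROOFS =====

-- proof-only helpers
def aScanPathLast (path : List (Int × Int × Int)) (gl : List ((Int × Int) × Int)) : Bool :=
  match path.getLast? with
  | some (ox, oy, _) => aScanPath path gl ox oy
  | none => false

-- "occ records a time above Tg at cell c"
def ExceedsP (occ : PySem.Dict (Int × Int) Int) (c : Int × Int) (Tg : Int) : Prop :=
  ∃ m, occ.get? c = some m ∧ Tg < m

-- the conflict contributed by one (pid, path) entry at cell c above Tg
def PathConfl (path : List (Int × Int × Int)) (c : Int × Int) (Tg : Int) : Prop :=
  ∃ ox oy gt', path.getLast? = some (ox, oy, gt') ∧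
    ∃ p ∈ path, (p.1, p.2.1) ≠ (ox, oy) ∧ (p.1, p.2.1) = c ∧ Tg < p.2.2

theorem bGoal_eq_aGoal (items : List (Int × List (Int × Int × Int)))
    (gi : PySem.Dict (Int × Int) Int) : bGoal items gi = aGoal items gi := by
  induction items generalizing gi with
  | nil => rfl
  | cons hd tl ih =>
    obtain ⟨pid, path⟩ := hd
    simp only [bGoal, aGoal]
    cases hg : PySem.List.pyGet? path (-1) with
    | none => rfl
    | some z =>
      obtain ⟨gx, gy, gt⟩ := z
      cases hc : gi.contains (gx, gy) <;> simp [hc, ih]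

theorem aGoal_some (items : List (Int × List (Int × Int × Int)))
    (gi : PySem.Dict (Int × Int) Int) (h : ∀ p ∈ items, p.2 ≠ []) :
    ∃ gi', aGoal items gi = some gi' := by
  induction items generalizing gi with
  | nil => exact ⟨gi, rfl⟩
  | cons hd tl ih =>
    obtain ⟨pid, path⟩ := hd
    have hne : path ≠ [] := h (pid, path) (by simp)
    have hlast : ∃ z, path.getLast? = some z := by
      cases hl : path.getLast? with
      | none => exact absurd (List.getLast?_eq_none_iff.mp hl) hne
      | some z => exact ⟨z, rfl⟩
    obtain ⟨⟨gx, gy, gt⟩, hz⟩ := hlast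
    have htl : ∀ p ∈ tl, p.2 ≠ [] := fun p hp => h p (List.mem_cons_of_mem _ hp)
    simp only [aGoal, PySem.List.pyGet?_neg_one, hz]
    cases hc : gi.contains (gx, gy) <;> simp <;> exact ih _ htl

theorem aScanGoals_true (gl : List ((Int × Int) × Int)) (x y t ox oy : Int) :
    aScanGoals gl x y t ox oy = true ↔
      ∃ g ∈ gl, x = g.1.1 ∧ y = g.1.2 ∧ g.2 < t ∧ ¬(ox = g.1.1 ∧ oy = g.1.2) := by
  induction gl with
  | nil => simp [aScanGoals]
  | cons g rest ih =>
    obtain ⟨⟨gx, gy⟩, Tg⟩ := g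
    simp only [aScanGoals]
    by_cases h1 : x = gx ∧ y = gy ∧ Tg < t
    · have hcond : (x == gx && y == gy && decide (t > Tg)) = true := by
        simp [h1.1, h1.2.1, h1.2.2]
      rw [if_pos hcond]
      by_cases h2 : ox = gx ∧ oy = gy
      · have hin : (!(ox == gx && oy == gy)) = false := by simp [h2.1, h2.2]
        rw [if_neg (by simp [hin]), ih]
        constructor
        · rintro ⟨g, hg, r⟩; exact ⟨g, List.mem_cons_of_mem _ hg, r⟩
        · rintro ⟨g, hg, hx, hy, ht, hn⟩
          rcases List.mem_cons.mp hg with rfl | hg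
          · exact absurd ⟨h2.1, h2.2⟩ hn
          · exact ⟨g, hg, hx, hy, ht, hn⟩
      · have hin : (!(ox == gx && oy == gy)) = true := by
          simp only [Bool.not_eq_true', Bool.and_eq_false_iff]
          by_cases ha : ox = gx
          · right; simp; exact fun hb => h2 ⟨ha, hb⟩
          · left; simp [ha]
        rw [if_pos hin]
        constructor
        · intro _; exact ⟨((gx, gy), Tg), List.mem_cons_self, h1.1, h1.2.1, h1.2.2, h2⟩
        · intro _; rfl
    · have hcond : (x == gx && y == gy && decide (t > Tg)) = false := by
        simp only [Bool.and_eq_false_iff]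
        by_cases ha : x = gx
        · by_cases hb : y = gy
          · right; simp; omega
          · left; right; simp [hb]
        · left; left; simp [ha]
      rw [if_neg (by simp [hcond]), ih]
      constructor
      · rintro ⟨g, hg, r⟩; exact ⟨g, List.mem_cons_of_mem _ hg, r⟩
      · rintro ⟨g, hg, hx, hy, ht, hn⟩
        rcases List.mem_cons.mp hg with rfl | hg
        · exact absurd ⟨hx, hy, ht⟩ h1
        · exact ⟨g, hg, hx, hy, ht, hn⟩

theorem aScanPath_true (path : List (Int × Int × Int)) (gl : List ((Int × Int) × Int))
    (ox oy : Int) :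
    aScanPath path gl ox oy = true ↔
      ∃ p ∈ path, aScanGoals gl p.1 p.2.1 p.2.2 ox oy = true := by
  induction path with
  | nil => simp [aScanPath]
  | cons p rest ih =>
    obtain ⟨x, y, t⟩ := p
    simp only [aScanPath]
    by_cases h : aScanGoals gl x y t ox oy = true
    · simp [h]
    · simp only [h, Bool.false_eq_true, if_false, ih]
      constructor
      · rintro ⟨q, hq, hs⟩; exact ⟨q, List.mem_cons_of_mem _ hq, hs⟩
      · rintro ⟨q, hq, hs⟩
        rcases List.mem_cons.mp hq with rfl | hq
        · exact absurd hs h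
        · exact ⟨q, hq, hs⟩

theorem aSecond_eq (items : List (Int × List (Int × Int × Int)))
    (gl : List ((Int × Int) × Int)) (h : ∀ p ∈ items, p.2 ≠ []) :
    aSecond items gl = some (items.all (fun pr => !aScanPathLast pr.2 gl)) := by
  induction items with
  | nil => simp [aSecond]
  | cons hd tl ih =>
    obtain ⟨pid, path⟩ := hd
    have hne : path ≠ [] := h (pid, path) (by simp)
    have hlast : ∃ z, path.getLast? = some z := by
      cases hl : path.getLast? with
      | none => exact absurd (List.getLast?_eq_none_iff.mp hl) hne
      | some z => exact ⟨z, rfl⟩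
    obtain ⟨⟨ox, oy, gt'⟩, hz⟩ := hlast
    have htl : ∀ p ∈ tl, p.2 ≠ [] := fun p hp => h p (List.mem_cons_of_mem _ hp)
    have hh : aScanPathLast path gl = aScanPath path gl ox oy := by
      simp [aScanPathLast, hz]
    simp only [aSecond, PySem.List.pyGet?_neg_one, hz, List.all_cons, hh]
    cases hs : aScanPath path gl ox oy
    · rw [if_neg (by simp), ih htl]; simp
    · rw [if_pos (by simp)]; simp

theorem bCheck_true (gl : List ((Int × Int) × Int)) (occ : PySem.Dict (Int × Int) Int) :
    bCheck gl occ = true ↔ ∀ g ∈ gl, ¬ ExceedsP occ g.1 g.2 := by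
  induction gl with
  | nil => simp [bCheck]
  | cons g rest ih =>
    obtain ⟨cell, Tg⟩ := g
    simp only [bCheck]
    cases hm : occ.get? cell with
    | none =>
      simp only [ih]
      constructor
      · rintro hr g hg
        rcases List.mem_cons.mp hg with rfl | hg
        · rintro ⟨m, hm', _⟩; simp [hm] at hm'
        · exact hr g hg
      · intro hr g hg; exact hr g (List.mem_cons_of_mem _ hg)
    | some m =>
      by_cases ht : Tg < m
      · simp only [ht, decide_true, if_true]
        constructor
        · intro h0; exact absurd h0 (by simp)
        · intro hr
          exact absurd (hr (cell, Tg) (List.mem_cons_self) ) (by simp [ExceedsP]; exact ⟨m, hm, ht⟩)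
      · simp only [ht, decide_false, Bool.false_eq_true, if_false, ih]
        constructor
        · rintro hr g hg
          rcases List.mem_cons.mp hg with rfl | hg
          · rintro ⟨m', hm', hlt⟩
            rw [hm] at hm'; injection hm' with e; omega
          · exact hr g hg
        · intro hr g hg; exact hr g (List.mem_cons_of_mem _ hg)

theorem exceeds_bOccPath (own : Int × Int) (path : List (Int × Int × Int))
    (occ : PySem.Dict (Int × Int) Int) (c : Int × Int) (Tg : Int) :
    ExceedsP (bOccPath own path occ) c Tg ↔
      ExceedsP occ c Tg ∨ ∃ p ∈ path, (p.1, p.2.1) ≠ own ∧ (p.1, p.2.1) = c ∧ Tg < p.2.2 := by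
  induction path generalizing occ with
  | nil => simp [bOccPath]
  | cons p rest ih =>
    obtain ⟨x, y, t⟩ := p
    simp only [bOccPath, List.foldl_cons]
    rw [show (rest.foldl _ _) = bOccPath own rest _ from rfl]
    rw [ih]
    have key : ∀ occ' : PySem.Dict (Int × Int) Int,
        (occ' = if !((x, y) == own) then
            (if occ.contains (x, y) = false || decide (occ.getD (x, y) 0 < t)
              then occ.insert (x, y) t else occ)
          else occ) →
        (ExceedsP occ' c Tg ↔ ExceedsP occ c Tg ∨ ((x, y) ≠ own ∧ (x, y) = c ∧ Tg < t)) := by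
      intro occ' ho
      by_cases hown : (x, y) = own
      · simp [hown] at ho; subst ho; simp [hown]
      · simp only [Bool.not_eq_true'] at ho
        rw [if_pos (by simp [hown])] at ho
        by_cases hins : occ.contains (x, y) = false ∨ occ.getD (x, y) 0 < t
        · rw [if_pos (by rcases hins with h | h <;> simp [h])] at ho
          subst ho
          by_cases hc : c = (x, y)
          · subst hc
            unfold ExceedsP
            simp only [PySem.Dict.get?_insert_self]
            constructor
            · rintro ⟨m, hm, hlt⟩; injection hm with e; subst e
              refine Or.inr ⟨hown, ?_, hlt⟩
              trivial
            · rintro (⟨m, hm, hlt⟩ | ⟨_, _, hlt⟩)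
              · -- old entry exceeds; insert happened so old value < t, hence Tg < t
                refine ⟨t, rfl, ?_⟩
                rcases hins with hnc | hlt2
                · exact absurd hm (by
                    have := PySem.Dict.get?_eq_none_iff_contains (d := occ) (k := (x, y))
                    simp [this.mpr hnc])
                · have : occ.getD (x, y) 0 = m := PySem.Dict.getD_of_get?_eq_some _ _ hm
                  omega
              · exact ⟨t, rfl, hlt⟩
          · unfold ExceedsP
            rw [PySem.Dict.get?_insert_of_ne _ _ hc]
            constructor
            · exact fun h => Or.inl h
            · rintro (h | ⟨_, hcc, _⟩)
              · exact h
              · exact absurd hcc.symm hc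
        · rw [not_or, not_lt] at hins
          have hcond : (decide (occ.contains (x, y) = false) || decide (occ.getD (x, y) 0 < t)) = false := by
            have h2 := hins.2
            cases hcb : occ.contains (x, y)
            · exact absurd hcb hins.1
            · simp
              omega
          rw [if_neg (by rw [hcond]; simp)] at ho
          rw [ho]
          constructor
          · exact fun h => Or.inl h
          · rintro (h | ⟨hne2, hcc, hlt⟩)
            · exact h
            · -- not inserted: occ already holds a value ≥ t > Tg at (x,y) = c
              have hcon : occ.contains (x, y) = true := by
                cases hcb2 : occ.contains (x, y)
                · exact absurd hcb2 hins.1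
                · rfl
              have hsome : ∃ m, occ.get? (x, y) = some m := by
                cases hg : occ.get? (x, y) with
                | none => exact absurd ((PySem.Dict.get?_eq_none_iff_contains _ _).mp hg) (by simp [hcon])
                | some m => exact ⟨m, rfl⟩
              obtain ⟨m, hm⟩ := hsome
              have hgd : occ.getD (x, y) 0 = m := PySem.Dict.getD_of_get?_eq_some _ _ hm
              refine ⟨m, ?_, ?_⟩
              · rw [← hcc]; exact hm
              · have h2 := hins.2
                omega
    rw [key _ rfl]
    constructor
    · rintro (h | h) 
      · rcases h with h | h
        · exact Or.inl h
        · exact Or.inr ⟨(x, y, t), List.mem_cons_self, by simpa using h⟩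
      · obtain ⟨p, hp, hh⟩ := h
        exact Or.inr ⟨p, List.mem_cons_of_mem _ hp, hh⟩
    · rintro (h | ⟨p, hp, hh⟩)
      · exact Or.inl (Or.inl h)
      · rcases List.mem_cons.mp hp with rfl | hp
        · exact Or.inl (Or.inr (by simpa using hh))
        · exact Or.inr ⟨p, hp, hh⟩

theorem exceeds_bOcc (items : List (Int × List (Int × Int × Int)))
    (occ : PySem.Dict (Int × Int) Int) (h : ∀ p ∈ items, p.2 ≠ []) :
    ∃ o, bOcc items occ = some o ∧ ∀ c Tg,
      (ExceedsP o c Tg ↔ ExceedsP occ c Tg ∨ ∃ pr ∈ items, PathConfl pr.2 c Tg) := by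
  induction items generalizing occ with
  | nil => exact ⟨occ, rfl, fun c Tg => by simp⟩
  | cons hd tl ih =>
    obtain ⟨pid, path⟩ := hd
    have hne : path ≠ [] := h (pid, path) (by simp)
    have hlast : ∃ z, path.getLast? = some z := by
      cases hl : path.getLast? with
      | none => exact absurd (List.getLast?_eq_none_iff.mp hl) hne
      | some z => exact ⟨z, rfl⟩
    obtain ⟨⟨ox, oy, gt'⟩, hz⟩ := hlast
    have htl : ∀ p ∈ tl, p.2 ≠ [] := fun p hp => h p (List.mem_cons_of_mem _ hp)
    obtain ⟨o, ho, hiff⟩ := ih (bOccPath (ox, oy) path occ) htl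
    refine ⟨o, ?_, ?_⟩
    · simp only [bOcc, PySem.List.pyGet?_neg_one, hz, ho]
    · intro c Tg
      rw [hiff c Tg, exceeds_bOccPath]
      constructor
      · rintro ((h0 | hp) | ⟨pr, hpr, hc⟩)
        · exact Or.inl h0
        · exact Or.inr ⟨(pid, path), List.mem_cons_self, ox, oy, gt', hz, hp⟩
        · exact Or.inr ⟨pr, List.mem_cons_of_mem _ hpr, hc⟩
      · rintro (h0 | ⟨pr, hpr, hc⟩)
        · exact Or.inl (Or.inl h0)
        · rcases List.mem_cons.mp hpr with rfl | hpr
          · obtain ⟨ox', oy', gt'', hz', hp⟩ := hc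
            rw [hz] at hz'
            injection hz' with e
            obtain ⟨e1, e2, e3⟩ := Prod.mk.injEq .. ▸ e
            · exact Or.inl (Or.inr (by
                obtain ⟨p, hp1, hp2⟩ := hp
                cases e
                exact ⟨p, hp1, hp2⟩))
          · exact Or.inr ⟨pr, hpr, hc⟩

theorem exceeds_empty (c : Int × Int) (Tg : Int) :
    ¬ ExceedsP PySem.Dict.empty c Tg := by
  rintro ⟨m, hm, _⟩
  simp [PySem.Dict.get?_empty] at hm

-- the common conflict characterisation, from A's side
theorem aScanPathLast_true (path : List (Int × Int × Int)) (gl : List ((Int × Int) × Int)) :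
    aScanPathLast path gl = true ↔ ∃ g ∈ gl, PathConfl path g.1 g.2 := by
  unfold aScanPathLast
  cases hz : path.getLast? with
  | none =>
    simp only [PathConfl]
    constructor
    · intro h; exact absurd h (by simp)
    · rintro ⟨g, hg, ox, oy, gt', hz', _⟩; simp [hz] at hz'
  | some z =>
    obtain ⟨ox, oy, gt'⟩ := z
    rw [aScanPath_true]
    constructor
    · rintro ⟨p, hp, hs⟩
      rw [aScanGoals_true] at hs
      obtain ⟨g, hg, hx, hy, ht, hn⟩ := hs
      refine ⟨g, hg, ox, oy, gt', hz, p, hp, ?_, ?_, ht⟩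
      · intro e
        obtain ⟨e1, e2⟩ := Prod.mk.injEq .. ▸ e
        exact hn ⟨by rw [← e1, hx], by rw [← e2, hy]⟩
      · rw [hx, hy]
    · rintro ⟨g, hg, ox', oy', gt'', hz', p, hp, hne, hc, ht⟩
      rw [hz] at hz'; injection hz' with e
      refine ⟨p, hp, ?_⟩
      rw [aScanGoals_true]
      refine ⟨g, hg, ?_, ?_, ht, ?_⟩
      · rw [← hc]
      · rw [← hc]
      · intro ⟨e1, e2⟩
        cases e
        apply hne
        rw [hc]
        have : g.1 = (g.1.1, g.1.2) := rfl
        rw [this, ← e1, ← e2]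

-- ===== VERDICT (by name: the statement is the Claim_ definition above) =====
theorem validate_paths_spec : Claim_equal_validate_paths := by
  intro paths _hdom hpre
  unfold Spec_validate_paths validate_paths validate_paths_alt
  have hpre' : ∀ p ∈ (PySem.Dict.ofList paths).items, p.2 ≠ [] := hpre
  obtain ⟨gi, hgi⟩ := aGoal_some (PySem.Dict.ofList paths).items PySem.Dict.empty hpre'
  obtain ⟨o, ho, hiff⟩ := exceeds_bOcc (PySem.Dict.ofList paths).items PySem.Dict.empty hpre'
  simp only [bGoal_eq_aGoal, hgi, ho, aSecond_eq _ _ hpre']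
  apply Bool.eq_iff_iff.mpr
  rw [bCheck_true, List.all_eq_true]
  constructor
  · intro hall g hg hex
    rw [hiff] at hex
    rcases hex with hex | ⟨pr, hpr, hc⟩
    · exact exceeds_empty _ _ hex
    · have := hall pr hpr
      rw [Bool.not_eq_eq_eq_not, Bool.not_true] at this
      have h2 : aScanPathLast pr.2 gi.items = true :=
        (aScanPathLast_true pr.2 gi.items).mpr ⟨g, hg, hc⟩
      rw [this] at h2; exact absurd h2 (by simp)
  · intro hall pr hpr
    rw [Bool.not_eq_eq_eq_not, Bool.not_true]
    cases hs : aScanPathLast pr.2 gi.items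
    · rfl
    · exfalso
      obtain ⟨g, hg, hc⟩ := (aScanPathLast_true pr.2 gi.items).mp hs
      exact hall g hg ((hiff g.1 g.2).mpr (Or.inr ⟨pr, hpr, hc⟩))
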